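-- pv_equiv track=rewrite | github.com/Cinderfox/Microplastic-detection | main.py | select_largest_object
-- ===== SOURCE A (Python) =====
-- def select_largest_object(areas, bounding_boxes):
--     max_area = 0
--     selected_object = None
--     for i, (area, (min_x, min_y, max_x, max_y)) in enumerate(zip(areas, bounding_boxes)):
--         width = max_x - min_x
--         height = max_y - min_y
--
--         if area > max_area and width > 300 and height > 300:
--             max_area = area
--             selected_object = (i + 1, area, (min_x, min_y, max_x, max_y))
--     return selected_object
-- ===== SOURCE B (Python) =====
-- def select_largest_object(areas, bounding_boxes):
--     candidates = [
--         (i + 1, a, bb)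
--         for i, (a, bb) in enumerate(zip(areas, bounding_boxes))
--         if a > 0 and bb[2] - bb[0] > 300 and bb[3] - bb[1] > 300
--     ]
--     if not candidates:
--         return None
--     ranked = sorted(candidates, key=lambda c: c[1], reverse=True)
--     return ranked[0]
-- ===== Notes on version B (the rewrite author's own statement) =====
-- stated objective: alternative
-- what changed: Replaces A's single stateful running-max loop with filter-then-stable-descending-sort by area and taking the first ranked candidate (sort stability preserves A's first-wins tie behaviour).
import Mathlib
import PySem

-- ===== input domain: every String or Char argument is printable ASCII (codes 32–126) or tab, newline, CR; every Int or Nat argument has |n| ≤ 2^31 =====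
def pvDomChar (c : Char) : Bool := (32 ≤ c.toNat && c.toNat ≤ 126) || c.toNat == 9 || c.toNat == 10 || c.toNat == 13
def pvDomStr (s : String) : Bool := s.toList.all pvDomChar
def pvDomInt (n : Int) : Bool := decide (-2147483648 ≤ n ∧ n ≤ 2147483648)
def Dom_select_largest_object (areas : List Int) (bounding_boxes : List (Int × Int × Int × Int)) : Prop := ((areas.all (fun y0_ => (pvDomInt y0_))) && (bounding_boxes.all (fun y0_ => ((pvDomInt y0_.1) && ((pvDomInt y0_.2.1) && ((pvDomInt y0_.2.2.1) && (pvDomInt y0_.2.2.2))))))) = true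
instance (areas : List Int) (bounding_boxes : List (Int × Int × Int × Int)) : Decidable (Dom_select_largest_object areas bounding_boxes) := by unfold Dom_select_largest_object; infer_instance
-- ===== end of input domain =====

-- B replaces A's stateful running-max loop by filter + stable descending sort by area + take first (objective: alternative algorithm, same result).

-- ===== PORT A =====
-- A: one stateful pass keeping (max_area, selected_object).
def select_largest_object (areas : List Int) (bounding_boxes : List (Int × Int × Int × Int)) : Option (Int × Int × (Int × Int × Int × Int)) :=
  ((PySem.List.enumerate (areas.zip bounding_boxes)).foldl
    (fun (st : Int × Option (Int × Int × (Int × Int × Int × Int))) p =>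
      let i := p.1
      let area := p.2.1
      let min_x := p.2.2.1
      let min_y := p.2.2.2.1
      let max_x := p.2.2.2.2.1
      let max_y := p.2.2.2.2.2
      let width := max_x - min_x
      let height := max_y - min_y
      if area > st.1 ∧ width > 300 ∧ height > 300 then
        (area, some (i + 1, area, (min_x, min_y, max_x, max_y)))
      else st)
    (0, none)).2

-- ===== PORT B =====
-- B: keep qualifying candidates, stable-sort them by area descending, return the first (ranked[0]; head? is some on the nonempty branch).
def pvKeep (p : Int × (Int × (Int × Int × Int × Int))) : Option (Int × Int × (Int × Int × Int × Int)) :=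
  if p.2.1 > 0 ∧ p.2.2.2.2.1 - p.2.2.1 > 300 ∧ p.2.2.2.2.2 - p.2.2.2.1 > 300 then
    some (p.1 + 1, p.2.1, p.2.2)
  else none

def select_largest_object_alt (areas : List Int) (bounding_boxes : List (Int × Int × Int × Int)) : Option (Int × Int × (Int × Int × Int × Int)) :=
  let candidates := (PySem.List.enumerate (areas.zip bounding_boxes)).filterMap pvKeep
  if candidates.isEmpty then none
  else
    let ranked := PySem.List.sorted candidates (fun c => c.2.1) true
    ranked.head?

-- ===== PRECONDITION & SPEC =====
def Spec_select_largest_object (areas : List Int) (bounding_boxes : List (Int × Int × Int × Int)) (out : Option (Int × Int × (Int × Int × Int × Int))) : Prop := out = select_largest_object_alt areas bounding_boxes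
instance (areas : List Int) (bounding_boxes : List (Int × Int × Int × Int)) (out : Option (Int × Int × (Int × Int × Int × Int))) : Decidable (Spec_select_largest_object areas bounding_boxes out) := by unfold Spec_select_largest_object; infer_instance

-- ===== CLAIM (what is proved, stated in full; the proofs are below) =====
def Claim_equal_select_largest_object : Prop := ∀ (areas : List Int) (bounding_boxes : List (Int × Int × Int × Int)), Dom_select_largest_object areas bounding_boxes → Spec_select_largest_object areas bounding_boxes (select_largest_object areas bounding_boxes)

-- ===== LEMMAS AND PROOFS =====
def pvStepA (st : Int × Option (Int × Int × (Int × Int × Int × Int)))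
    (p : Int × (Int × (Int × Int × Int × Int))) : Int × Option (Int × Int × (Int × Int × Int × Int)) :=
  if p.2.1 > st.1 ∧ p.2.2.2.2.1 - p.2.2.1 > 300 ∧ p.2.2.2.2.2 - p.2.2.2.1 > 300 then
    (p.2.1, some (p.1 + 1, p.2.1, p.2.2))
  else st

def pvMaxStep (best c : Int × Int × (Int × Int × Int × Int)) : Int × Int × (Int × Int × Int × Int) :=
  if c.2.1 > best.2.1 then c else best

theorem foldl_eq_stepA (l : List (Int × (Int × (Int × Int × Int × Int))))
    (st : Int × Option (Int × Int × (Int × Int × Int × Int))) :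
    l.foldl
      (fun (st : Int × Option (Int × Int × (Int × Int × Int × Int))) p =>
        let i := p.1
        let area := p.2.1
        let min_x := p.2.2.1
        let min_y := p.2.2.2.1
        let max_x := p.2.2.2.2.1
        let max_y := p.2.2.2.2.2
        let width := max_x - min_x
        let height := max_y - min_y
        if area > st.1 ∧ width > 300 ∧ height > 300 then
          (area, some (i + 1, area, (min_x, min_y, max_x, max_y)))
        else st) st = l.foldl pvStepA st := by
  induction l generalizing st with
  | nil => rfl
  | cons x xs ih =>
      simp only [List.foldl_cons]
      rw [ih]
      rfl

theorem loop_from_candidate (l : List (Int × (Int × (Int × Int × Int × Int))))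
    (c : Int × Int × (Int × Int × Int × Int)) (hc : 0 < c.2.1) :
    (l.foldl pvStepA (c.2.1, some c)).2 = some ((l.filterMap pvKeep).foldl pvMaxStep c) := by
  induction l generalizing c with
  | nil => rfl
  | cons x xs ih =>
      simp only [List.foldl_cons, List.filterMap_cons, pvStepA, pvKeep]
      by_cases hw : x.2.2.2.2.1 - x.2.2.1 > 300 ∧ x.2.2.2.2.2 - x.2.2.2.1 > 300
      · by_cases ha : x.2.1 > c.2.1
        · rw [if_pos ⟨ha, hw⟩, if_pos ⟨by omega, hw⟩]
          simp only [List.foldl_cons]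
          rw [ih (x.1 + 1, x.2.1, x.2.2) (by simpa using by omega)]
          have : pvMaxStep c (x.1 + 1, x.2.1, x.2.2) = (x.1 + 1, x.2.1, x.2.2) := by
            simp [pvMaxStep, ha]
          rw [this]
          rfl
        · rw [if_neg (by tauto)]
          by_cases h0 : x.2.1 > 0
          · rw [if_pos ⟨h0, hw⟩]
            simp only [List.foldl_cons]
            rw [ih c hc]
            have : pvMaxStep c (x.1 + 1, x.2.1, x.2.2) = c := by
              simp [pvMaxStep]; omega
            rw [this]
            rfl
          · rw [if_neg (by tauto)]
            exact ih c hc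
      · rw [if_neg (by tauto), if_neg (by tauto)]
        exact ih c hc

theorem loop_from_zero (l : List (Int × (Int × (Int × Int × Int × Int)))) :
    (l.foldl pvStepA ((0 : Int), none)).2 =
      match l.filterMap pvKeep with
      | [] => none
      | c :: cs => some (cs.foldl pvMaxStep c) := by
  induction l with
  | nil => rfl
  | cons x xs ih =>
      simp only [List.foldl_cons, List.filterMap_cons, pvStepA, pvKeep]
      by_cases h : x.2.1 > 0 ∧ x.2.2.2.2.1 - x.2.2.1 > 300 ∧ x.2.2.2.2.2 - x.2.2.2.1 > 300
      · rw [if_pos h, if_pos h]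
        exact loop_from_candidate xs (x.1 + 1, x.2.1, x.2.2) (by simpa using h.1)
      · rw [if_neg h, if_neg h]
        exact ih

-- head of the stable descending insertion sort = running first-max
theorem head_foldl_insertBy (l ys : List (Int × Int × (Int × Int × Int × Int)))
    (y : Int × Int × (Int × Int × Int × Int)) :
    (l.foldl (fun acc x =>
        PySem.List.insertBy (fun a b => decide ((b.2.1 : Int) < a.2.1)) x acc) (y :: ys)).head? =
      some (l.foldl pvMaxStep y) := by
  induction l generalizing y ys with
  | nil => rfl
  | cons x xs ih =>
      simp only [List.foldl_cons, PySem.List.insertBy]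
      by_cases h : (y.2.1 : Int) < x.2.1
      · rw [if_pos (by simpa using h)]
        rw [ih (y :: ys) x]
        have : pvMaxStep y x = x := by simp [pvMaxStep]; omega
        rw [this]
      · rw [if_neg (by simpa using h)]
        rw [ih _ y]
        have : pvMaxStep y x = y := by simp [pvMaxStep]; omega
        rw [this]

theorem head_sorted_rev (c : Int × Int × (Int × Int × Int × Int))
    (cs : List (Int × Int × (Int × Int × Int × Int))) :
    (PySem.List.sorted (c :: cs) (fun x => x.2.1) true).head? = some (cs.foldl pvMaxStep c) := by
  rw [PySem.List.sorted_rev_eq_foldl_insertBy]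
  simp only [List.foldl_cons, PySem.List.insertBy]
  exact head_foldl_insertBy cs [] c

-- ===== VERDICT (by name: the statement is the Claim_ definition above) =====
theorem select_largest_object_spec : Claim_equal_select_largest_object := by
  intro areas bbs _
  show select_largest_object areas bbs = select_largest_object_alt areas bbs
  unfold select_largest_object select_largest_object_alt
  rw [foldl_eq_stepA, loop_from_zero]
  cases h : (PySem.List.enumerate (areas.zip bbs)).filterMap pvKeep with
  | nil => simp
  | cons c cs => simp [head_sorted_rev]
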